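-- pv_equiv track=rewrite | github.com/strawberry-tree/ProblemSolving | 프로그래머스/2/250136. ［PCCP 기출문제］ 2번 ／ 석유 시추/［PCCP 기출문제］ 2번 ／ 석유 시추.py | solution
-- ===== SOURCE A (Python) =====
-- from collections import deque
--
-- def solution(land):
--     # 열별로 뽑을 수 있는 석유량의 수
--     N, M = len(land), len(land[0])
--     oil_list = [0] * M
--     visited = [[False] * M for _ in range(N)]
--
--     def grid_bfs(sx, sy):
--         N, M = len(land), len(land[0])
--         dx = [-1, 0, 1, 0]
--         dy = [0, -1, 0, 1]
--
--         queue = deque([(sx, sy)])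
--         visited[sx][sy] = True
--         total_oil = 1
--         ok_cols = set([sy])
--
--         while queue:
--             cx, cy = queue.popleft()
--             for i in range(4):
--                 nx, ny = cx + dx[i], cy + dy[i]
--                 if 0 <= nx < N and 0 <= ny < M and land[nx][ny] == 1 and not visited[nx][ny]:
--                     queue.append((nx, ny))
--                     ok_cols.add(ny)
--                     visited[nx][ny] = True
--                     total_oil += 1
--
--         for col in ok_cols:
--             oil_list[col] += total_oil
--
--
--     # 모든 칸 순회하며, 석유가 뭍힌 땅 중 미방문 땅 있을 시 거기서부터 탐색
--     for i in range(N):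
--         for j in range(M):
--             if land[i][j] == 1 and not visited[i][j]:
--                 grid_bfs(i, j)
--
--
--     answer = max(oil_list)
--     return answer
-- ===== SOURCE B (Python) =====
-- def solution(land):
--     # Per-column multi-source frontier saturation: for each column, grow the set of
--     # cells reachable from that column's oil cells to a fixpoint and count it.
--     N, M = len(land), len(land[0])
--     best = 0
--     for c in range(M):
--         cells = {(i, c) for i in range(N) if land[i][c] == 1}
--         frontier = cells
--         while frontier:
--             nxt = set()
--             for (x, y) in frontier:
--                 for nx, ny in ((x - 1, y), (x + 1, y), (x, y - 1), (x, y + 1)):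
--                     if 0 <= nx < N and 0 <= ny < M and land[nx][ny] == 1 and (nx, ny) not in cells:
--                         nxt.add((nx, ny))
--             cells |= nxt
--             frontier = nxt
--         if len(cells) > best:
--             best = len(cells)
--     return best
-- ===== Notes on version B (the rewrite author's own statement) =====
-- stated objective: alternative
-- what changed: Replaces the per-component BFS with a shared visited matrix and per-component column bookkeeping by a per-column multi-source frontier saturation: for each column, the set of cells reachable from that column's oil cells is grown to a fixpoint and its size taken directly, with no visited matrix, no queue and no per-component accounting.
import Mathlib
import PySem

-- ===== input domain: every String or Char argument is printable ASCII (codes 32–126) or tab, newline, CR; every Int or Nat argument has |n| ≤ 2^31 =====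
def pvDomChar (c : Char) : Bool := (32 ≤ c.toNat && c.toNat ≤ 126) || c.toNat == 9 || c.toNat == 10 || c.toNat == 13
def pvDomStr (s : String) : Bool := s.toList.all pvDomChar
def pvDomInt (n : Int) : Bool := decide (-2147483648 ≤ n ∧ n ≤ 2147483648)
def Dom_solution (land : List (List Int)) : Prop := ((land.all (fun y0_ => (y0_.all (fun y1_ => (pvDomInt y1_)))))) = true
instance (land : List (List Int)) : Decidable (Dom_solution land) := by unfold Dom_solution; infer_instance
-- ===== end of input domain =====

-- B replaces the shared-visited per-component BFS by a per-column multi-source frontier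
-- saturation (alternative algorithm, not claimed faster); equivalence is about the return value.

-- ===== PORT A =====
-- land[x][y] (used only under 0 ≤ x < N, 0 ≤ y < M, where Pre_ makes it exact)
def pvCell (land : List (List Int)) (x y : Int) : Int :=
  PySem.List.pyGetD (PySem.List.pyGetD land x []) y 0

-- visited[x][y]
def pvVget (v : List (List Bool)) (x y : Int) : Bool :=
  PySem.List.pyGetD (PySem.List.pyGetD v x []) y false

-- visited[x][y] = True
def pvVset (v : List (List Bool)) (x y : Int) : List (List Bool) :=
  PySem.List.pySetD v x (PySem.List.pySetD (PySem.List.pyGetD v x []) y true)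

-- one direction i of the 'for i in range(4)' body; state = (queue, visited, total_oil, ok_cols)
def pvBfsStep (land : List (List Int)) (N M cx cy : Int)
    (st : List (Int × Int) × List (List Bool) × Int × PySem.Set Int) (d : Int × Int) :
    List (Int × Int) × List (List Bool) × Int × PySem.Set Int :=
  if 0 ≤ cx + d.1 ∧ cx + d.1 < N ∧ 0 ≤ cy + d.2 ∧ cy + d.2 < M ∧
      pvCell land (cx + d.1) (cy + d.2) = 1 ∧ pvVget st.2.1 (cx + d.1) (cy + d.2) = false then
    (st.1 ++ [(cx + d.1, cy + d.2)], pvVset st.2.1 (cx + d.1) (cy + d.2), st.2.2.1 + 1,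
      PySem.Set.add st.2.2.2 (cy + d.2))
  else st

-- the 'while queue' loop (fuel only makes it total; proved never exhausted under Pre_)
def pvBfsLoop (land : List (List Int)) (N M : Int) :
    Nat → List (Int × Int) → List (List Bool) → Int → PySem.Set Int →
    List (List Bool) × Int × PySem.Set Int
  | _, [], v, total, ok => (v, total, ok)
  | 0, _ :: _, v, total, ok => (v, total, ok)
  | fuel + 1, (cx, cy) :: rest, v, total, ok =>
      let st := List.foldl (pvBfsStep land N M cx cy) (rest, v, total, ok)
        [(-1, 0), (0, -1), (1, 0), (0, 1)]
      pvBfsLoop land N M fuel st.1 st.2.1 st.2.2.1 st.2.2.2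

-- grid_bfs(sx, sy): returns the updated (visited, oil_list)
def pvGridBfs (land : List (List Int)) (N M : Int) (visited : List (List Bool))
    (oil : List Int) (sx sy : Int) : List (List Bool) × List Int :=
  let st := pvBfsLoop land N M (N.toNat * M.toNat + 1) [(sx, sy)] (pvVset visited sx sy) 1
      (PySem.Set.ofList [sy])
  (st.1, st.2.2.foldl
    (fun ol col => PySem.List.pySetD ol col (PySem.List.pyGetD ol col 0 + st.2.1)) oil)

def solution (land : List (List Int)) : Int :=
  let N : Int := land.length
  let M : Int := (PySem.List.pyGetD land 0 []).length
  let oil0 : List Int := List.replicate M.toNat 0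
  let v0 : List (List Bool) := List.replicate N.toNat (List.replicate M.toNat false)
  let fin := (PySem.List.pyRange 0 N 1).foldl (fun st i =>
      (PySem.List.pyRange 0 M 1).foldl (fun st j =>
        if pvCell land i j = 1 ∧ pvVget st.1 i j = false then
          pvGridBfs land N M st.1 st.2 i j
        else st) st) (v0, oil0)
  (PySem.List.max? fin.2 (fun x => x)).getD 0

-- ===== PORT B =====
-- the four neighbour offsets ((x-1,y),(x+1,y),(x,y-1),(x,y+1))
def pvNbrs (x y : Int) : List (Int × Int) := [(x - 1, y), (x + 1, y), (x, y - 1), (x, y + 1)]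

-- one round: nxt = valid unseen neighbours of the frontier
def pvGrow (land : List (List Int)) (N M : Int) (cells frontier : PySem.Set (Int × Int)) :
    PySem.Set (Int × Int) :=
  frontier.foldl (fun nxt p =>
    (pvNbrs p.1 p.2).foldl (fun nxt q =>
      if 0 ≤ q.1 ∧ q.1 < N ∧ 0 ≤ q.2 ∧ q.2 < M ∧ pvCell land q.1 q.2 = 1 ∧ q ∉ cells then
        PySem.Set.add nxt q
      else nxt) nxt) PySem.Set.empty

-- the 'while frontier' loop (fuel only makes it total; proved never exhausted under Pre_)
def pvSatLoop (land : List (List Int)) (N M : Int) :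
    Nat → PySem.Set (Int × Int) → PySem.Set (Int × Int) → PySem.Set (Int × Int)
  | _, cells, [] => cells
  | 0, cells, _ :: _ => cells
  | fuel + 1, cells, f :: fs =>
      let nxt := pvGrow land N M cells (f :: fs)
      pvSatLoop land N M fuel (PySem.Set.union cells nxt) nxt

def solution_alt (land : List (List Int)) : Int :=
  let N : Int := land.length
  let M : Int := (PySem.List.pyGetD land 0 []).length
  (PySem.List.pyRange 0 M 1).foldl (fun best c =>
    let seeds : PySem.Set (Int × Int) := PySem.Set.ofList
      (((PySem.List.pyRange 0 N 1).filter (fun i => pvCell land i c == 1)).map (fun i => (i, c)))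
    let cells := pvSatLoop land N M (N.toNat * M.toNat + 1) seeds seeds
    if (cells.length : Int) > best then (cells.length : Int) else best) 0

-- ===== PRECONDITION & SPEC =====
-- Pre_ = exactly A's return domain: A raises IndexError when some row is shorter than row 0
-- (the outer loop indexes land[i][j] for every j < M) and ValueError (max of []) when M = 0.
def Pre_solution (land : List (List Int)) : Prop :=
  land ≠ [] ∧ 0 < (PySem.List.pyGetD land 0 []).length ∧
    ∀ row ∈ land, (PySem.List.pyGetD land 0 []).length ≤ row.length
instance (land : List (List Int)) : Decidable (Pre_solution land) := by
  unfold Pre_solution; infer_instance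
def pvWitness_solution : List (List Int) := [[1, 0], [0, 1]]

def Spec_solution (land : List (List Int)) (out : Int) : Prop := out = solution_alt land
instance (land : List (List Int)) (out : Int) : Decidable (Spec_solution land out) := by
  unfold Spec_solution; infer_instance

-- ===== CLAIM (what is proved, stated in full; the proofs are below) =====
def Claim_equal_solution : Prop := ∀ (land : List (List Int)), Dom_solution land →
  Pre_solution land → Spec_solution land (solution land)
-- ===== LEMMAS AND PROOFS =====
-- dimensions
def pvN (land : List (List Int)) : Int := land.length
def pvM (land : List (List Int)) : Int := (PySem.List.pyGetD land 0 []).length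

-- in-bounds cells, oil cells, grid adjacency, reachability
def PIn (land : List (List Int)) (p : Int × Int) : Prop :=
  0 ≤ p.1 ∧ p.1 < pvN land ∧ 0 ≤ p.2 ∧ p.2 < pvM land

def POne (land : List (List Int)) (p : Int × Int) : Prop :=
  0 ≤ p.1 ∧ p.1 < pvN land ∧ 0 ≤ p.2 ∧ p.2 < pvM land ∧ pvCell land p.1 p.2 = 1

def PAdj (land : List (List Int)) (p q : Int × Int) : Prop :=
  POne land p ∧ POne land q ∧ q ∈ pvNbrs p.1 p.2

def PReach (land : List (List Int)) : Int × Int → Int × Int → Prop :=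
  Relation.ReflTransGen (PAdj land)

def PComp (land : List (List Int)) (s : Int × Int) : Set (Int × Int) := {t | PReach land s t}

def PRcol (land : List (List Int)) (c : Int) : Set (Int × Int) :=
  {t | ∃ s, POne land s ∧ s.2 = c ∧ PReach land s t}

def PClosed (land : List (List Int)) (S : Set (Int × Int)) : Prop :=
  ∀ a ∈ S, ∀ b, PAdj land a b → b ∈ S

theorem pvAdj_symm (land : List (List Int)) (p q : Int × Int) (h : PAdj land p q) :
    PAdj land q p := by
  obtain ⟨h1, h2, h3⟩ := h
  refine ⟨h2, h1, ?_⟩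
  obtain ⟨x, y⟩ := p; obtain ⟨a, b⟩ := q
  simp [pvNbrs, Prod.ext_iff] at h3 ⊢
  omega

theorem pvReach_symm (land : List (List Int)) (p q : Int × Int) (h : PReach land p q) :
    PReach land q p :=
  Relation.ReflTransGen.symmetric (fun _ _ hpq => pvAdj_symm land _ _ hpq) h

theorem pvReach_One (land : List (List Int)) (s t : Int × Int) (h : PReach land s t)
    (hs : POne land s) : POne land t := by
  induction h with
  | refl => exact hs
  | tail _ hab _ => exact hab.2.1

theorem pvComp_closed (land : List (List Int)) (s : Int × Int) :
    PClosed land (PComp land s) := fun a ha b hab => Relation.ReflTransGen.tail ha hab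

theorem pvComp_subset_of_closed (land : List (List Int)) (s : Int × Int)
    (D : Set (Int × Int)) (hD : PClosed land D) (hs : s ∈ D) : PComp land s ⊆ D := by
  intro t ht
  induction ht with
  | refl => exact hs
  | tail hab hadj ih => exact hD _ ih _ hadj

theorem pvComp_disjoint_closed (land : List (List Int)) (s : Int × Int)
    (V : Set (Int × Int)) (hV : PClosed land V) (hs : s ∉ V) :
    ∀ t ∈ PComp land s, t ∉ V := by
  intro t ht htV
  exact hs (pvComp_subset_of_closed land t V hV htV (pvReach_symm land s t ht))

theorem pvRcol_closed (land : List (List Int)) (c : Int) : PClosed land (PRcol land c) := by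
  rintro a ⟨s0, h1, h2, hr⟩ b hab
  exact ⟨s0, h1, h2, Relation.ReflTransGen.tail hr hab⟩

theorem pvRcol_One (land : List (List Int)) (c : Int) (t : Int × Int)
    (ht : t ∈ PRcol land c) : POne land t := by
  obtain ⟨s0, h1, _, hr⟩ := ht
  exact pvReach_One land s0 t hr h1

theorem pvComp_subset_Rcol (land : List (List Int)) (s : Int × Int) (hs : POne land s)
    (c : Int) (t : Int × Int) (ht : t ∈ PComp land s) (hc : t.2 = c) :
    PComp land s ⊆ PRcol land c := by
  intro u hu
  exact ⟨t, pvReach_One land s t ht hs, hc,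
    Relation.ReflTransGen.trans (pvReach_symm land s t ht) hu⟩

theorem pvComp_disjoint_Rcol (land : List (List Int)) (s : Int × Int) (hs : POne land s)
    (c : Int) (h : ∀ t ∈ PComp land s, t.2 ≠ c) :
    ∀ u ∈ PComp land s, u ∉ PRcol land c := by
  rintro u hu ⟨s0, h1, h2, hr⟩
  exact h s0 (Relation.ReflTransGen.trans hu (pvReach_symm land s0 u hr)) h2

-- the bounding box and cardinality bounds
noncomputable def pvBoxF (land : List (List Int)) : Finset (Int × Int) :=
  Finset.Icc 0 (pvN land - 1) ×ˢ Finset.Icc 0 (pvM land - 1)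

theorem pvIn_mem_box (land : List (List Int)) (p : Int × Int) (h : PIn land p) :
    p ∈ pvBoxF land := by
  obtain ⟨x, y⟩ := p
  simp only [pvBoxF, Finset.mem_product, Finset.mem_Icc, Prod.fst, Prod.snd]
  obtain ⟨a, b, c, d⟩ := h
  constructor <;> constructor <;> omega

theorem pvBox_card (land : List (List Int)) :
    (pvBoxF land).card = (pvN land).toNat * (pvM land).toNat := by
  have h1 : pvN land - 1 + 1 - 0 = pvN land := by ring
  have h2 : pvM land - 1 + 1 - 0 = pvM land := by ring
  simp only [pvBoxF, Finset.card_product, Int.card_Icc, h1, h2]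

theorem pvOne_In (land : List (List Int)) (p : Int × Int) (h : POne land p) : PIn land p :=
  ⟨h.1, h.2.1, h.2.2.1, h.2.2.2.1⟩

theorem pvFinite_of_subset_In (land : List (List Int)) (S : Set (Int × Int))
    (h : ∀ p ∈ S, PIn land p) : S.Finite :=
  Set.Finite.subset (pvBoxF land).finite_toSet (fun p hp => pvIn_mem_box land p (h p hp))

theorem pvNcard_le_box (land : List (List Int)) (S : Set (Int × Int))
    (h : ∀ p ∈ S, PIn land p) : S.ncard ≤ (pvN land).toNat * (pvM land).toNat := by
  calc S.ncard ≤ (↑(pvBoxF land) : Set (Int × Int)).ncard :=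
        Set.ncard_le_ncard (fun p hp => pvIn_mem_box land p (h p hp))
          (pvBoxF land).finite_toSet
    _ = (pvBoxF land).card := Set.ncard_coe_finset _
    _ = _ := pvBox_card land

theorem pvComp_In (land : List (List Int)) (s : Int × Int) (hs : POne land s) :
    ∀ p ∈ PComp land s, PIn land p :=
  fun p hp => pvOne_In land p (pvReach_One land s p hp hs)

theorem pvRcol_In (land : List (List Int)) (c : Int) :
    ∀ p ∈ PRcol land c, PIn land p :=
  fun p hp => pvOne_In land p (pvRcol_One land c p hp)

-- visited-matrix machinery
def PShape (land : List (List Int)) (v : List (List Bool)) : Prop :=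
  v.length = land.length ∧ ∀ r ∈ v, r.length = (pvM land).toNat

def PMarked (land : List (List Int)) (v : List (List Bool)) : Set (Int × Int) :=
  {p | PIn land p ∧ pvVget v p.1 p.2 = true}

theorem pvPyGetD_mem_or {α : Type} (xs : List α) (i : Int) (d : α) :
    PySem.List.pyGetD xs i d ∈ xs ∨ PySem.List.pyGetD xs i d = d := by
  have h : PySem.List.pyGetD xs i d = (PySem.List.pyGet? xs i).getD d := rfl
  rw [h]
  cases hg : PySem.List.pyGet? xs i with
  | none => right; rfl
  | some a => left; simpa using PySem.List.mem_of_pyGet?_eq_some xs hg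

theorem pvVget_replicate (n m : ℕ) (x y : Int) :
    pvVget (List.replicate n (List.replicate m false)) x y = false := by
  unfold pvVget
  rcases pvPyGetD_mem_or (List.replicate n (List.replicate m false)) x [] with h | h
  · rw [List.eq_of_mem_replicate h]
    rcases pvPyGetD_mem_or (List.replicate m false) y false with h2 | h2
    · exact List.eq_of_mem_replicate h2
    · exact h2
  · rw [h]
    rcases pvPyGetD_mem_or ([] : List Bool) y false with h2 | h2
    · exact absurd h2 (List.not_mem_nil)
    · exact h2

theorem pvShape_replicate (land : List (List Int)) :
    PShape land (List.replicate (pvN land).toNat (List.replicate (pvM land).toNat false)) := by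
  constructor
  · simp [pvN]
  · intro r hr
    rw [List.eq_of_mem_replicate hr, List.length_replicate]

theorem pvRow_lt (land : List (List Int)) (v : List (List Bool)) (x : Int)
    (hsh : PShape land v) (hx : 0 ≤ x) (hx2 : x < pvN land) : x.toNat < v.length := by
  rw [hsh.1]; simp only [pvN] at hx2; omega

theorem pvRow_mem (land : List (List Int)) (v : List (List Bool)) (x : Int)
    (hsh : PShape land v) (hx : 0 ≤ x) (hx2 : x < pvN land) :
    PySem.List.pyGetD v x [] ∈ v := by
  rw [PySem.List.pyGetD_of_nonneg _ _ hx]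
  have hl := pvRow_lt land v x hsh hx hx2
  rw [List.getD_eq_getElem _ _ hl]
  exact v.getElem_mem hl

theorem pvShape_vset (land : List (List Int)) (v : List (List Bool)) (x y : Int)
    (hsh : PShape land v) (hx : 0 ≤ x) (hx2 : x < pvN land) : PShape land (pvVset v x y) := by
  unfold pvVset
  rw [PySem.List.pySetD_of_nonneg _ _ hx]
  constructor
  · rw [List.length_set]; exact hsh.1
  · intro r hr
    rcases List.mem_or_eq_of_mem_set hr with h | h
    · exact hsh.2 r h
    · subst h
      rw [PySem.List.length_pySetD]
      exact hsh.2 _ (pvRow_mem land v x hsh hx hx2)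

theorem pvGetSetD {α : Type} (xs : List α) (i j : Int) (v d : α) (hi : 0 ≤ i) (hj : 0 ≤ j)
    (hil : i.toNat < xs.length) :
    PySem.List.pyGetD (PySem.List.pySetD xs i v) j d =
      if j = i then v else PySem.List.pyGetD xs j d := by
  have hiN : i = ((i.toNat : ℕ) : Int) := by omega
  have hjN : j = ((j.toNat : ℕ) : Int) := by omega
  rw [hiN, hjN, PySem.List.pyGetD_pySetD_natCast _ _ _ _ _ hil]
  by_cases h : j.toNat = i.toNat
  · rw [if_pos h, if_pos (by omega)]
  · rw [if_neg h, if_neg (by omega), ← hjN]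

theorem pvVget_vset (land : List (List Int)) (v : List (List Bool)) (x y a b : Int)
    (hsh : PShape land v) (hx : 0 ≤ x) (hx2 : x < pvN land) (hy : 0 ≤ y) (hy2 : y < pvM land)
    (ha : 0 ≤ a) (hb : 0 ≤ b) :
    pvVget (pvVset v x y) a b = if a = x ∧ b = y then true else pvVget v a b := by
  have hxl : x.toNat < v.length := pvRow_lt land v x hsh hx hx2
  have hrowlen : (PySem.List.pyGetD v x []).length = (pvM land).toNat :=
    hsh.2 _ (pvRow_mem land v x hsh hx hx2)
  have hyl : y.toNat < (PySem.List.pyGetD v x []).length := by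
    rw [hrowlen]; simp only [pvM] at hy2 ⊢; omega
  unfold pvVget pvVset
  rw [pvGetSetD v x a _ [] hx ha hxl]
  by_cases hax : a = x
  · subst hax
    rw [if_pos rfl, pvGetSetD _ y b true false hy hb hyl]
    by_cases hby : b = y
    · rw [if_pos hby, if_pos ⟨rfl, hby⟩]
    · rw [if_neg hby, if_neg (by tauto)]
  · rw [if_neg hax, if_neg (by tauto)]

-- the oil_list update loop 'for col in ok_cols: oil_list[col] += total'
theorem pvOilFold (M total : Int) (ok : List Int) (hnd : ok.Nodup)
    (hin : ∀ c ∈ ok, 0 ≤ c ∧ c < M) :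
    ∀ oil : List Int, oil.length = M.toNat →
      (List.foldl (fun ol col => PySem.List.pySetD ol col (PySem.List.pyGetD ol col 0 + total))
          oil ok).length = M.toNat ∧
      ∀ c : Int, 0 ≤ c → c < M →
        PySem.List.pyGetD
            (List.foldl (fun ol col =>
              PySem.List.pySetD ol col (PySem.List.pyGetD ol col 0 + total)) oil ok) c 0 =
          PySem.List.pyGetD oil c 0 + (if c ∈ ok then total else 0) := by
  induction ok with
  | nil => intro oil hlen; simp [hlen]
  | cons col rest ih =>
      intro oil hlen
      have hcol := hin col (List.mem_cons_self)
      have hcl : col.toNat < oil.length := by rw [hlen]; omega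
      have hlen' : (PySem.List.pySetD oil col (PySem.List.pyGetD oil col 0 + total)).length
          = M.toNat := by rw [PySem.List.length_pySetD]; exact hlen
      obtain ⟨ihlen, ihval⟩ := ih (List.Nodup.of_cons hnd)
        (fun c hc => hin c (List.mem_cons_of_mem _ hc)) _ hlen'
      refine ⟨by simpa using ihlen, ?_⟩
      intro c hc hc2
      rw [List.foldl_cons, ihval c hc hc2]
      rw [pvGetSetD oil col c _ 0 (by omega) hc hcl]
      by_cases hcc : c = col
      · have hnotin : c ∉ rest := by rw [hcc]; exact (List.nodup_cons.mp hnd).1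
        rw [if_pos hcc, if_neg hnotin, if_pos (by rw [hcc]; exact List.mem_cons_self), hcc]
        ring
      · rw [if_neg hcc]
        by_cases hmem : c ∈ rest
        · rw [if_pos hmem, if_pos (List.mem_cons_of_mem _ hmem)]
        · rw [if_neg hmem, if_neg (by simp [hcc, hmem])]

-- BFS loop invariant: V₀ = previously marked cells, D = cells of the current component
-- discovered so far
def BfsInv (land : List (List Int)) (s : Int × Int) (V₀ : Set (Int × Int))
    (queue : List (Int × Int)) (v : List (List Bool)) (total : Int) (ok : PySem.Set Int)
    (D : Set (Int × Int)) : Prop :=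
  PShape land v ∧
  (∀ p : Int × Int, PIn land p → (pvVget v p.1 p.2 = true ↔ p ∈ V₀ ∪ D)) ∧
  D ⊆ PComp land s ∧ s ∈ D ∧ (∀ q ∈ queue, q ∈ D) ∧
  total = (D.ncard : Int) ∧ (∀ y : Int, y ∈ ok ↔ ∃ x : Int, (x, y) ∈ D) ∧ ok.Nodup

theorem pvNbrs_of_dir (cur d : Int × Int)
    (hd : d ∈ ([(-1, 0), (0, -1), (1, 0), (0, 1)] : List (Int × Int))) :
    (cur.1 + d.1, cur.2 + d.2) ∈ pvNbrs cur.1 cur.2 := by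
  fin_cases hd <;> simp [pvNbrs, Prod.ext_iff] <;> omega

theorem pvNbrs_exists_dir (x y : Int) (q : Int × Int) (h : q ∈ pvNbrs x y) :
    ∃ d ∈ ([(-1, 0), (0, -1), (1, 0), (0, 1)] : List (Int × Int)),
      q = (x + d.1, y + d.2) := by
  simp only [pvNbrs, List.mem_cons, List.not_mem_nil, or_false] at h
  obtain ⟨a, b⟩ := q
  rcases h with h | h | h | h
  · exact ⟨(-1, 0), by norm_num, by simp [Prod.ext_iff] at h ⊢; omega⟩
  · exact ⟨(1, 0), by norm_num, by simp [Prod.ext_iff] at h ⊢; omega⟩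
  · exact ⟨(0, -1), by norm_num, by simp [Prod.ext_iff] at h ⊢; omega⟩
  · exact ⟨(0, 1), by norm_num, by simp [Prod.ext_iff] at h ⊢; omega⟩

theorem pvBfsStepLemma (land : List (List Int)) (s : Int × Int) (hs : POne land s)
    (V₀ : Set (Int × Int)) (hdisj : ∀ t ∈ PComp land s, t ∉ V₀)
    (cur : Int × Int) (hcur : cur ∈ PComp land s)
    (d : Int × Int) (hd : d ∈ ([(-1, 0), (0, -1), (1, 0), (0, 1)] : List (Int × Int)))
    (queue : List (Int × Int)) (v : List (List Bool)) (total : Int) (ok : PySem.Set Int)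
    (D : Set (Int × Int)) (hinv : BfsInv land s V₀ queue v total ok D) :
    ∃ (queue' : List (Int × Int)) (v' : List (List Bool)) (total' : Int)
      (ok' : PySem.Set Int) (D' : Set (Int × Int)),
      pvBfsStep land (pvN land) (pvM land) cur.1 cur.2 (queue, v, total, ok) d
        = (queue', v', total', ok') ∧
      D ⊆ D' ∧ BfsInv land s V₀ queue' v' total' ok' D' ∧
      queue'.length + (PComp land s \ D').ncard = queue.length + (PComp land s \ D).ncard ∧
      (∀ a ∈ D', a ∈ D ∨ a ∈ queue') ∧ (∀ q ∈ queue, q ∈ queue') ∧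
      (POne land (cur.1 + d.1, cur.2 + d.2) → (cur.1 + d.1, cur.2 + d.2) ∈ D') := by
  obtain ⟨hsh, hmk, hDC, hsD, hqD, htot, hok, hnd⟩ := hinv
  have hcurOne : POne land cur := pvReach_One land s cur hcur hs
  have hbnbr := pvNbrs_of_dir cur d hd
  have hCfin : (PComp land s).Finite :=
    pvFinite_of_subset_In land _ (pvComp_In land s hs)
  have hDfin : D.Finite := hCfin.subset hDC
  by_cases hc : 0 ≤ cur.1 + d.1 ∧ cur.1 + d.1 < pvN land ∧ 0 ≤ cur.2 + d.2 ∧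
      cur.2 + d.2 < pvM land ∧ pvCell land (cur.1 + d.1) (cur.2 + d.2) = 1 ∧
      pvVget v (cur.1 + d.1) (cur.2 + d.2) = false
  · -- the neighbour is a fresh oil cell: enqueue and mark it
    obtain ⟨h1, h2, h3, h4, h5, h6⟩ := hc
    have hbOne : POne land (cur.1 + d.1, cur.2 + d.2) := ⟨h1, h2, h3, h4, h5⟩
    have hbAdj : PAdj land cur (cur.1 + d.1, cur.2 + d.2) := ⟨hcurOne, hbOne, hbnbr⟩
    have hbC : (cur.1 + d.1, cur.2 + d.2) ∈ PComp land s :=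
      pvComp_closed land s cur hcur _ hbAdj
    have hbnot : (cur.1 + d.1, cur.2 + d.2) ∉ V₀ ∪ D := by
      intro hmem
      have := (hmk _ (pvOne_In land _ hbOne)).mpr hmem
      rw [h6] at this; exact Bool.false_ne_true this
    have hbD : (cur.1 + d.1, cur.2 + d.2) ∉ D := fun h => hbnot (Or.inr h)
    refine ⟨queue ++ [(cur.1 + d.1, cur.2 + d.2)],
      pvVset v (cur.1 + d.1) (cur.2 + d.2), total + 1,
      PySem.Set.add ok (cur.2 + d.2), insert (cur.1 + d.1, cur.2 + d.2) D, ?_, ?_, ?_, ?_, ?_, ?_, ?_⟩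
    · simp [pvBfsStep, h1, h2, h3, h4, h5, h6]
    · exact Set.subset_insert _ _
    · refine ⟨pvShape_vset land v _ _ hsh h1 h2, ?_, ?_, Set.mem_insert_of_mem _ hsD, ?_, ?_, ?_,
        PySem.Set.nodup_add ok _ hnd⟩
      · intro p hp
        rw [pvVget_vset land v _ _ p.1 p.2 hsh h1 h2 h3 h4 hp.1 hp.2.2.1]
        by_cases hpb : p = (cur.1 + d.1, cur.2 + d.2)
        · rw [if_pos (by rw [hpb]; exact ⟨rfl, rfl⟩), hpb]
          simp
        · rw [if_neg (by
            intro hcontr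
            exact hpb (Prod.ext_iff.mpr ⟨hcontr.1, hcontr.2⟩)), hmk p hp]
          constructor
          · rintro (h | h)
            · exact Or.inl h
            · exact Or.inr (Set.mem_insert_of_mem _ h)
          · rintro (h | h)
            · exact Or.inl h
            · rcases Set.mem_insert_iff.mp h with h | h
              · exact absurd h hpb
              · exact Or.inr h
      · exact Set.insert_subset hbC hDC
      · intro q hq
        rcases List.mem_append.mp hq with h | h
        · exact Set.mem_insert_of_mem _ (hqD q h)
        · rw [List.mem_singleton.mp h]; exact Set.mem_insert _ _
      · rw [htot, Set.ncard_insert_of_notMem hbD hDfin]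
        push_cast; ring
      · intro y
        rw [PySem.Set.mem_add ok _ y]
        constructor
        · rintro (h | h)
          · obtain ⟨x, hx⟩ := (hok y).mp h
            exact ⟨x, Set.mem_insert_of_mem _ hx⟩
          · exact ⟨cur.1 + d.1, by rw [h]; exact Set.mem_insert _ _⟩
        · rintro ⟨x, hx⟩
          rcases Set.mem_insert_iff.mp hx with h | h
          · right; exact (Prod.ext_iff.mp h).2
          · left; exact (hok y).mpr ⟨x, h⟩
    · rw [List.length_append, List.length_singleton]
      have hdiff : PComp land s \ insert (cur.1 + d.1, cur.2 + d.2) D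
          = (PComp land s \ D) \ {(cur.1 + d.1, cur.2 + d.2)} := by
        ext t; simp only [Set.mem_diff, Set.mem_insert_iff, Set.mem_singleton_iff]; tauto
      have hbCD : (cur.1 + d.1, cur.2 + d.2) ∈ PComp land s \ D := ⟨hbC, hbD⟩
      rw [hdiff, Set.ncard_diff_singleton_of_mem hbCD]
      have hpos : 0 < (PComp land s \ D).ncard :=
        (Set.ncard_pos (hCfin.subset Set.diff_subset)).mpr ⟨_, hbCD⟩
      omega
    · intro a ha
      rcases Set.mem_insert_iff.mp ha with h | h
      · right; rw [h]; exact List.mem_append_right _ (List.mem_singleton_self _)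
      · left; exact h
    · exact fun q hq => List.mem_append_left _ hq
    · intro _; exact Set.mem_insert _ _
  · -- nothing happens; but an in-bounds oil neighbour must already be in D
    refine ⟨queue, v, total, ok, D, by simp [pvBfsStep, hc], le_refl D,
      ⟨hsh, hmk, hDC, hsD, hqD, htot, hok, hnd⟩, rfl, fun a ha => Or.inl ha,
      fun q hq => hq, ?_⟩
    intro hbOne
    have hbAdj : PAdj land cur (cur.1 + d.1, cur.2 + d.2) := ⟨hcurOne, hbOne, hbnbr⟩
    have hbC : (cur.1 + d.1, cur.2 + d.2) ∈ PComp land s :=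
      pvComp_closed land s cur hcur _ hbAdj
    have hvt : pvVget v (cur.1 + d.1) (cur.2 + d.2) = true := by
      obtain ⟨h1, h2, h3, h4, h5⟩ := hbOne
      by_cases hv : pvVget v (cur.1 + d.1) (cur.2 + d.2) = false
      · exact absurd ⟨h1, h2, h3, h4, h5, hv⟩ hc
      · simpa using hv
    have := (hmk _ (pvOne_In land _ hbOne)).mp hvt
    rcases this with h | h
    · exact absurd h (hdisj _ hbC)
    · exact h

theorem pvBfsLoop_nil (land : List (List Int)) (N M : Int) (fuel : Nat)
    (v : List (List Bool)) (total : Int) (ok : PySem.Set Int) :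
    pvBfsLoop land N M fuel [] v total ok = (v, total, ok) := by
  cases fuel <;> rfl

theorem pvBfsLoopLemma (land : List (List Int)) (s : Int × Int) (hs : POne land s)
    (V₀ : Set (Int × Int)) (hdisj : ∀ t ∈ PComp land s, t ∉ V₀) :
    ∀ (fuel : Nat) (queue : List (Int × Int)) (v : List (List Bool)) (total : Int)
      (ok : PySem.Set Int) (D : Set (Int × Int)),
      BfsInv land s V₀ queue v total ok D →
      (∀ a ∈ D, a ∉ queue → ∀ b, PAdj land a b → b ∈ D) →
      queue.length + (PComp land s \ D).ncard ≤ fuel →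
      PShape land (pvBfsLoop land (pvN land) (pvM land) fuel queue v total ok).1 ∧
      (∀ p : Int × Int, PIn land p →
        (pvVget (pvBfsLoop land (pvN land) (pvM land) fuel queue v total ok).1 p.1 p.2 = true
          ↔ p ∈ V₀ ∪ PComp land s)) ∧
      (pvBfsLoop land (pvN land) (pvM land) fuel queue v total ok).2.1
        = ((PComp land s).ncard : Int) ∧
      (∀ y : Int, y ∈ (pvBfsLoop land (pvN land) (pvM land) fuel queue v total ok).2.2
        ↔ ∃ x : Int, (x, y) ∈ PComp land s) ∧
      List.Nodup (pvBfsLoop land (pvN land) (pvM land) fuel queue v total ok).2.2 := by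
  intro fuel
  induction fuel with
  | zero =>
      intro queue v total ok D hinv hclo hfuel
      obtain ⟨hsh, hmk, hDC, hsD, hqD, htot, hok, hnd⟩ := hinv
      match queue with
      | [] =>
          have hclosedD : PClosed land D := fun a ha b hab =>
            hclo a ha (List.not_mem_nil) b hab
          have hDeq : D = PComp land s :=
            Set.Subset.antisymm hDC (pvComp_subset_of_closed land s D hclosedD hsD)
          rw [pvBfsLoop_nil]
          subst hDeq
          exact ⟨hsh, hmk, htot, hok, hnd⟩
      | q :: rest => simp [List.length_cons] at hfuel
  | succ fuel ih =>
      intro queue v total ok D hinv hclo hfuel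
      obtain ⟨hsh, hmk, hDC, hsD, hqD, htot, hok, hnd⟩ := hinv
      match queue with
      | [] =>
          have hclosedD : PClosed land D := fun a ha b hab =>
            hclo a ha (List.not_mem_nil) b hab
          have hDeq : D = PComp land s :=
            Set.Subset.antisymm hDC (pvComp_subset_of_closed land s D hclosedD hsD)
          rw [pvBfsLoop_nil]
          subst hDeq
          exact ⟨hsh, hmk, htot, hok, hnd⟩
      | (cx, cy) :: rest =>
          have hcur : (cx, cy) ∈ PComp land s := hDC (hqD _ List.mem_cons_self)
          have hinv0 : BfsInv land s V₀ rest v total ok D :=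
            ⟨hsh, hmk, hDC, hsD, fun q hq => hqD q (List.mem_cons_of_mem _ hq), htot, hok, hnd⟩
          obtain ⟨q1, v1, t1, o1, D1, heq1, hsub1, hinv1, hlen1, hDQ1, hQQ1, hnb1⟩ :=
            pvBfsStepLemma land s hs V₀ hdisj (cx, cy) hcur (-1, 0) (by norm_num)
              rest v total ok D hinv0
          obtain ⟨q2, v2, t2, o2, D2, heq2, hsub2, hinv2, hlen2, hDQ2, hQQ2, hnb2⟩ :=
            pvBfsStepLemma land s hs V₀ hdisj (cx, cy) hcur (0, -1) (by norm_num)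
              q1 v1 t1 o1 D1 hinv1
          obtain ⟨q3, v3, t3, o3, D3, heq3, hsub3, hinv3, hlen3, hDQ3, hQQ3, hnb3⟩ :=
            pvBfsStepLemma land s hs V₀ hdisj (cx, cy) hcur (1, 0) (by norm_num)
              q2 v2 t2 o2 D2 hinv2
          obtain ⟨q4, v4, t4, o4, D4, heq4, hsub4, hinv4, hlen4, hDQ4, hQQ4, hnb4⟩ :=
            pvBfsStepLemma land s hs V₀ hdisj (cx, cy) hcur (0, 1) (by norm_num)
              q3 v3 t3 o3 D3 hinv3
          have hred : pvBfsLoop land (pvN land) (pvM land) (fuel + 1) ((cx, cy) :: rest)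
              v total ok = pvBfsLoop land (pvN land) (pvM land) fuel q4 v4 t4 o4 := by
            have hr0 : pvBfsLoop land (pvN land) (pvM land) (fuel + 1) ((cx, cy) :: rest)
                v total ok = pvBfsLoop land (pvN land) (pvM land) fuel
                  (List.foldl (pvBfsStep land (pvN land) (pvM land) cx cy)
                    (rest, v, total, ok) [(-1, 0), (0, -1), (1, 0), (0, 1)]).1
                  (List.foldl (pvBfsStep land (pvN land) (pvM land) cx cy)
                    (rest, v, total, ok) [(-1, 0), (0, -1), (1, 0), (0, 1)]).2.1
                  (List.foldl (pvBfsStep land (pvN land) (pvM land) cx cy)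
                    (rest, v, total, ok) [(-1, 0), (0, -1), (1, 0), (0, 1)]).2.2.1
                  (List.foldl (pvBfsStep land (pvN land) (pvM land) cx cy)
                    (rest, v, total, ok) [(-1, 0), (0, -1), (1, 0), (0, 1)]).2.2.2 := rfl
            rw [hr0, List.foldl_cons, List.foldl_cons, List.foldl_cons, List.foldl_cons,
              List.foldl_nil, heq1, heq2, heq3, heq4]
          rw [hred]
          have hQsub : ∀ x ∈ rest, x ∈ q4 :=
            fun x hx => hQQ4 _ (hQQ3 _ (hQQ2 _ (hQQ1 _ hx)))
          have hsubD14 : D1 ⊆ D4 := hsub2.trans (hsub3.trans hsub4)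
          have hsubD24 : D2 ⊆ D4 := hsub3.trans hsub4
          have hsubD : D ⊆ D4 := hsub1.trans hsubD14
          have hDQ : ∀ a ∈ D4, a ∈ D ∨ a ∈ q4 := by
            intro a ha
            rcases hDQ4 a ha with h | h
            · rcases hDQ3 a h with h' | h'
              · rcases hDQ2 a h' with h'' | h''
                · rcases hDQ1 a h'' with h3 | h3
                  · exact Or.inl h3
                  · exact Or.inr (hQQ4 _ (hQQ3 _ (hQQ2 _ h3)))
                · exact Or.inr (hQQ4 _ (hQQ3 _ h''))
              · exact Or.inr (hQQ4 _ h')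
            · exact Or.inr h
          have hclo4 : ∀ a ∈ D4, a ∉ q4 → ∀ b, PAdj land a b → b ∈ D4 := by
            intro a ha hnotq b hab
            rcases hDQ a ha with haD | haq
            · by_cases hacur : a = (cx, cy)
              · obtain ⟨d, hdmem, hbeq⟩ := pvNbrs_exists_dir a.1 a.2 b hab.2.2
                subst hacur
                have hbOne : POne land b := hab.2.1
                fin_cases hdmem
                · rw [hbeq]; exact hsubD14 (hnb1 (hbeq ▸ hbOne))
                · rw [hbeq]; exact hsubD24 (hnb2 (hbeq ▸ hbOne))
                · rw [hbeq]; exact hsub4 (hnb3 (hbeq ▸ hbOne))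
                · rw [hbeq]; exact hnb4 (hbeq ▸ hbOne)
              · have hnotfull : a ∉ (cx, cy) :: rest := by
                  simp only [List.mem_cons, not_or]
                  exact ⟨hacur, fun hx => hnotq (hQsub _ hx)⟩
                exact hsubD (hclo a haD hnotfull b hab)
            · exact absurd haq hnotq
          have hfuel4 : q4.length + (PComp land s \ D4).ncard ≤ fuel := by
            rw [List.length_cons] at hfuel
            omega
          exact ih q4 v4 t4 o4 D4 hinv4 hclo4 hfuel4

theorem pvGridBfsLemma (land : List (List Int)) (sx sy : Int) (hone : POne land (sx, sy))
    (v : List (List Bool)) (oil : List Int) (hsh : PShape land v)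
    (hcl : PClosed land (PMarked land v)) (hun : pvVget v sx sy = false)
    (hlen : oil.length = (pvM land).toNat) :
    PShape land (pvGridBfs land (pvN land) (pvM land) v oil sx sy).1 ∧
    (∀ p : Int × Int, PIn land p →
      (pvVget (pvGridBfs land (pvN land) (pvM land) v oil sx sy).1 p.1 p.2 = true
        ↔ p ∈ PMarked land v ∪ PComp land (sx, sy))) ∧
    (pvGridBfs land (pvN land) (pvM land) v oil sx sy).2.length = (pvM land).toNat ∧
    (∀ c : Int, 0 ≤ c → c < pvM land →
      ((∃ x : Int, (x, c) ∈ PComp land (sx, sy)) →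
        PySem.List.pyGetD (pvGridBfs land (pvN land) (pvM land) v oil sx sy).2 c 0
          = PySem.List.pyGetD oil c 0 + ((PComp land (sx, sy)).ncard : Int)) ∧
      ((¬ ∃ x : Int, (x, c) ∈ PComp land (sx, sy)) →
        PySem.List.pyGetD (pvGridBfs land (pvN land) (pvM land) v oil sx sy).2 c 0
          = PySem.List.pyGetD oil c 0)) := by
  have hsnot : (sx, sy) ∉ PMarked land v := by
    intro h
    exact Bool.false_ne_true (hun ▸ h.2)
  have hdisj : ∀ t ∈ PComp land (sx, sy), t ∉ PMarked land v :=
    pvComp_disjoint_closed land (sx, sy) _ hcl hsnot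
  have hCfin : (PComp land (sx, sy)).Finite :=
    pvFinite_of_subset_In land _ (pvComp_In land (sx, sy) hone)
  have hsC : (sx, sy) ∈ PComp land (sx, sy) := Relation.ReflTransGen.refl
  have hinv : BfsInv land (sx, sy) (PMarked land v) [(sx, sy)] (pvVset v sx sy) 1
      (PySem.Set.ofList [sy]) {(sx, sy)} := by
    refine ⟨pvShape_vset land v sx sy hsh hone.1 hone.2.1, ?_, ?_, rfl, ?_, ?_, ?_, ?_⟩
    · intro p hp
      rw [pvVget_vset land v sx sy p.1 p.2 hsh hone.1 hone.2.1 hone.2.2.1 hone.2.2.2.1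
        hp.1 hp.2.2.1]
      by_cases hpb : p = (sx, sy)
      · rw [if_pos (by rw [hpb]; exact ⟨rfl, rfl⟩)]
        simp [hpb]
      · rw [if_neg (fun hcontr => hpb (Prod.ext_iff.mpr ⟨hcontr.1, hcontr.2⟩))]
        constructor
        · intro hv; exact Or.inl ⟨hp, hv⟩
        · rintro (h | h)
          · exact h.2
          · exact absurd h hpb
    · exact Set.singleton_subset_iff.mpr hsC
    · intro q hq; rw [List.mem_singleton.mp hq]; rfl
    · simp
    · intro y
      rw [PySem.Set.mem_ofList]
      simp only [List.mem_singleton, Set.mem_singleton_iff, Prod.ext_iff]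
      constructor
      · intro h; exact ⟨sx, rfl, h⟩
      · rintro ⟨x, _, h⟩; exact h
    · exact PySem.Set.nodup_ofList [sy]
  have hclo : ∀ a ∈ ({(sx, sy)} : Set (Int × Int)), a ∉ [(sx, sy)] →
      ∀ b, PAdj land a b → b ∈ ({(sx, sy)} : Set (Int × Int)) := by
    intro a ha hnot
    exact absurd (by rw [Set.mem_singleton_iff.mp ha]; exact List.mem_singleton_self _) hnot
  have hfuel : ([(sx, sy)] : List (Int × Int)).length
      + (PComp land (sx, sy) \ {(sx, sy)}).ncard
      ≤ (pvN land).toNat * (pvM land).toNat + 1 := by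
    have h1 : (PComp land (sx, sy) \ {(sx, sy)}).ncard = (PComp land (sx, sy)).ncard - 1 :=
      Set.ncard_diff_singleton_of_mem hsC
    have h2 : (PComp land (sx, sy)).ncard ≤ (pvN land).toNat * (pvM land).toNat :=
      pvNcard_le_box land _ (pvComp_In land (sx, sy) hone)
    simp only [List.length_singleton]
    omega
  obtain ⟨l1, l2, l3, l4, l5⟩ := pvBfsLoopLemma land (sx, sy) hone (PMarked land v) hdisj
    ((pvN land).toNat * (pvM land).toNat + 1) [(sx, sy)] (pvVset v sx sy) 1
    (PySem.Set.ofList [sy]) {(sx, sy)} hinv hclo hfuel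
  have hgb : pvGridBfs land (pvN land) (pvM land) v oil sx sy =
      ((pvBfsLoop land (pvN land) (pvM land) ((pvN land).toNat * (pvM land).toNat + 1)
        [(sx, sy)] (pvVset v sx sy) 1 (PySem.Set.ofList [sy])).1,
       List.foldl (fun ol col => PySem.List.pySetD ol col (PySem.List.pyGetD ol col 0 +
          (pvBfsLoop land (pvN land) (pvM land) ((pvN land).toNat * (pvM land).toNat + 1)
            [(sx, sy)] (pvVset v sx sy) 1 (PySem.Set.ofList [sy])).2.1)) oil
        (pvBfsLoop land (pvN land) (pvM land) ((pvN land).toNat * (pvM land).toNat + 1)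
          [(sx, sy)] (pvVset v sx sy) 1 (PySem.Set.ofList [sy])).2.2) := rfl
  have hin : ∀ c ∈ (pvBfsLoop land (pvN land) (pvM land)
      ((pvN land).toNat * (pvM land).toNat + 1) [(sx, sy)] (pvVset v sx sy) 1
      (PySem.Set.ofList [sy])).2.2, 0 ≤ c ∧ c < pvM land := by
    intro c hc
    obtain ⟨x, hx⟩ := (l4 c).mp hc
    have := pvComp_In land (sx, sy) hone _ hx
    exact ⟨this.2.2.1, this.2.2.2⟩
  obtain ⟨flen, fval⟩ := pvOilFold (pvM land)
    ((pvBfsLoop land (pvN land) (pvM land) ((pvN land).toNat * (pvM land).toNat + 1)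
      [(sx, sy)] (pvVset v sx sy) 1 (PySem.Set.ofList [sy])).2.1) _ l5 hin oil hlen
  refine ⟨by rw [hgb]; exact l1, by rw [hgb]; exact l2, by rw [hgb]; exact flen, ?_⟩
  intro c hc hc2
  constructor
  · intro hex
    rw [hgb]
    have hmem : c ∈ (pvBfsLoop land (pvN land) (pvM land)
        ((pvN land).toNat * (pvM land).toNat + 1) [(sx, sy)] (pvVset v sx sy) 1
        (PySem.Set.ofList [sy])).2.2 := (l4 c).mpr hex
    rw [fval c hc hc2, if_pos hmem, l3]
  · intro hex
    rw [hgb]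
    have hmem : c ∉ (pvBfsLoop land (pvN land) (pvM land)
        ((pvN land).toNat * (pvM land).toNat + 1) [(sx, sy)] (pvVset v sx sy) 1
        (PySem.Set.ofList [sy])).2.2 := fun h => hex ((l4 c).mp h)
    rw [fval c hc hc2, if_neg hmem, add_zero]

-- outer-loop invariant
def POuter (land : List (List Int)) (st : List (List Bool) × List Int) : Prop :=
  PShape land st.1 ∧ PClosed land (PMarked land st.1) ∧ st.2.length = (pvM land).toNat ∧
  ∀ c : Int, 0 ≤ c → c < pvM land →
    PySem.List.pyGetD st.2 c 0 = ((PMarked land st.1 ∩ PRcol land c).ncard : Int)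

theorem pvCellStep (land : List (List Int)) (i j : Int) (hi : 0 ≤ i) (hi2 : i < pvN land)
    (hj : 0 ≤ j) (hj2 : j < pvM land) (st : List (List Bool) × List Int)
    (h : POuter land st) (st' : List (List Bool) × List Int)
    (heq : st' = if pvCell land i j = 1 ∧ pvVget st.1 i j = false then
        pvGridBfs land (pvN land) (pvM land) st.1 st.2 i j else st) :
    POuter land st' ∧ PMarked land st.1 ⊆ PMarked land st'.1 ∧
      (POne land (i, j) → (i, j) ∈ PMarked land st'.1) := by
  obtain ⟨hsh, hcl, hlen, hoil⟩ := h
  by_cases hcond : pvCell land i j = 1 ∧ pvVget st.1 i j = false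
  · have hone : POne land (i, j) := ⟨hi, hi2, hj, hj2, hcond.1⟩
    rw [if_pos hcond] at heq
    obtain ⟨g1, g2, g3, g4⟩ := pvGridBfsLemma land i j hone st.1 st.2 hsh hcl hcond.2 hlen
    rw [← heq] at g1 g2 g3 g4
    have hM : PMarked land st'.1 = PMarked land st.1 ∪ PComp land (i, j) := by
      ext p
      constructor
      · intro hp; exact (g2 p hp.1).mp hp.2
      · intro hp
        have hpin : PIn land p := by
          rcases hp with hp | hp
          · exact hp.1
          · exact pvComp_In land (i, j) hone p hp
        exact ⟨hpin, (g2 p hpin).mpr hp⟩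
    have hsnot : (i, j) ∉ PMarked land st.1 := by
      intro hmem
      exact Bool.false_ne_true (hcond.2 ▸ hmem.2)
    have hdisjC : ∀ t ∈ PComp land (i, j), t ∉ PMarked land st.1 :=
      pvComp_disjoint_closed land (i, j) _ hcl hsnot
    have hCfin : (PComp land (i, j)).Finite :=
      pvFinite_of_subset_In land _ (pvComp_In land (i, j) hone)
    have hMfin : (PMarked land st.1).Finite :=
      pvFinite_of_subset_In land _ (fun p hp => hp.1)
    refine ⟨⟨g1, ?_, g3, ?_⟩, ?_, ?_⟩
    · rw [hM]
      intro a ha b hab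
      rcases ha with ha | ha
      · exact Or.inl (hcl a ha b hab)
      · exact Or.inr (pvComp_closed land (i, j) a ha b hab)
    · intro c hc hc2
      rw [hM, Set.union_inter_distrib_right]
      by_cases hex : ∃ x : Int, (x, c) ∈ PComp land (i, j)
      · obtain ⟨x, hx⟩ := hex
        have hsubR : PComp land (i, j) ⊆ PRcol land c :=
          pvComp_subset_Rcol land (i, j) hone c (x, c) hx rfl
        have hCR : PComp land (i, j) ∩ PRcol land c = PComp land (i, j) :=
          Set.inter_eq_left.mpr hsubR
        rw [hCR, Set.ncard_union_eq
            (Set.disjoint_left.mpr (fun a ha hb => hdisjC a hb ha.1))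
            (hMfin.subset Set.inter_subset_left) hCfin]
        rw [(g4 c hc hc2).1 ⟨x, hx⟩, hoil c hc hc2]
        push_cast; ring
      · have hCR : PComp land (i, j) ∩ PRcol land c = ∅ := by
          apply Set.eq_empty_iff_forall_notMem.mpr
          rintro t ⟨ht1, ht2⟩
          exact pvComp_disjoint_Rcol land (i, j) hone c
            (fun u hu huc => hex ⟨u.1, by rw [← huc]; exact hu⟩) t ht1 ht2
        rw [hCR, Set.union_empty, (g4 c hc hc2).2 hex, hoil c hc hc2]
    · rw [hM]; exact Set.subset_union_left
    · intro _; rw [hM]; exact Or.inr Relation.ReflTransGen.refl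
  · rw [if_neg hcond] at heq
    rw [heq]
    refine ⟨⟨hsh, hcl, hlen, hoil⟩, subset_rfl, ?_⟩
    intro hone
    have hvt : pvVget st.1 i j = true := by
      by_cases hv : pvVget st.1 i j = false
      · exact absurd ⟨hone.2.2.2.2, hv⟩ hcond
      · simpa using hv
    exact ⟨pvOne_In land _ hone, hvt⟩

theorem pvRowLoop (land : List (List Int)) (i : Int) (hi : 0 ≤ i) (hi2 : i < pvN land) :
    ∀ (n : Nat) (a : Int), 0 ≤ a → (pvM land - a).toNat = n →
      ∀ st : List (List Bool) × List Int, POuter land st →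
      ∀ st' : List (List Bool) × List Int,
        st' = List.foldl (fun st j => if pvCell land i j = 1 ∧ pvVget st.1 i j = false
          then pvGridBfs land (pvN land) (pvM land) st.1 st.2 i j else st) st
          (PySem.List.pyRange a (pvM land) 1) →
      POuter land st' ∧ PMarked land st.1 ⊆ PMarked land st'.1 ∧
        (∀ p : Int × Int, p.1 = i → a ≤ p.2 → p.2 < pvM land → POne land p →
          p ∈ PMarked land st'.1) := by
  intro n
  induction n with
  | zero =>
      intro a ha hn st hst st' heq
      rw [PySem.List.pyRange_one_eq_nil (by omega), List.foldl_nil] at heq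
      rw [heq]
      exact ⟨hst, subset_rfl, fun p _ h1 h2 _ => absurd (by omega : a < a) (lt_irrefl a)⟩
  | succ n ih =>
      intro a ha hn st hst st' heq
      have haM : a < pvM land := by omega
      rw [PySem.List.pyRange_one_cons haM, List.foldl_cons] at heq
      obtain ⟨h1, hsub1, hcov1⟩ := pvCellStep land i a hi hi2 ha haM st hst
        (if pvCell land i a = 1 ∧ pvVget st.1 i a = false
          then pvGridBfs land (pvN land) (pvM land) st.1 st.2 i a else st) rfl
      obtain ⟨h2, hsub2, hcov2⟩ := ih (a + 1) (by omega) (by omega) _ h1 st' heq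
      refine ⟨h2, hsub1.trans hsub2, ?_⟩
      intro p hp1 hp2 hp3 hpone
      by_cases hpa : p.2 = a
      · have hpeq : p = (i, a) := Prod.ext_iff.mpr ⟨hp1, hpa⟩
        rw [hpeq]
        exact hsub2 (hcov1 (hpeq ▸ hpone))
      · exact hcov2 p hp1 (by omega) hp3 hpone

theorem pvColLoop (land : List (List Int)) :
    ∀ (n : Nat) (a : Int), 0 ≤ a → (pvN land - a).toNat = n →
      ∀ st : List (List Bool) × List Int, POuter land st →
      ∀ st' : List (List Bool) × List Int,
        st' = List.foldl (fun st i =>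
          List.foldl (fun st j => if pvCell land i j = 1 ∧ pvVget st.1 i j = false
            then pvGridBfs land (pvN land) (pvM land) st.1 st.2 i j else st) st
            (PySem.List.pyRange 0 (pvM land) 1)) st
          (PySem.List.pyRange a (pvN land) 1) →
      POuter land st' ∧
        (∀ p : Int × Int, a ≤ p.1 → p.1 < pvN land → POne land p →
          p ∈ PMarked land st'.1) := by
  intro n
  induction n with
  | zero =>
      intro a ha hn st hst st' heq
      rw [PySem.List.pyRange_one_eq_nil (a := a) (b := pvN land) (by omega),
        List.foldl_nil] at heq
      rw [heq]
      exact ⟨hst, fun p h1 h2 _ => absurd (by omega : a < a) (lt_irrefl a)⟩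
  | succ n ih =>
      intro a ha hn st hst st' heq
      have haN : a < pvN land := by omega
      rw [PySem.List.pyRange_one_cons haN, List.foldl_cons] at heq
      obtain ⟨h1, hsub1, hcov1⟩ := pvRowLoop land a ha haN (pvM land).toNat 0 (le_refl 0)
        (by omega) st hst _ rfl
      obtain ⟨h2, hcov2⟩ := ih (a + 1) (by omega) (by omega) _ h1 st' heq
      refine ⟨h2, ?_⟩
      intro p hp1 hp2 hpone
      by_cases hpa : p.1 = a
      · -- covered by the row pass for row a, then preserved
        have hmarked : p ∈ PMarked land (List.foldl (fun st j =>
            if pvCell land a j = 1 ∧ pvVget st.1 a j = false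
            then pvGridBfs land (pvN land) (pvM land) st.1 st.2 a j else st) st
            (PySem.List.pyRange 0 (pvM land) 1)).1 :=
          hcov1 p hpa hpone.2.2.1 hpone.2.2.2.1 hpone
        -- marked cells stay marked through the remaining rows
        have hmono : ∀ (m : Nat) (b : Int), 0 ≤ b →
            ∀ s0 : List (List Bool) × List Int, POuter land s0 →
            (pvN land - b).toNat = m →
            p ∈ PMarked land s0.1 →
            p ∈ PMarked land (List.foldl (fun st i =>
              List.foldl (fun st j => if pvCell land i j = 1 ∧ pvVget st.1 i j = false
                then pvGridBfs land (pvN land) (pvM land) st.1 st.2 i j else st) st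
                (PySem.List.pyRange 0 (pvM land) 1)) s0
              (PySem.List.pyRange b (pvN land) 1)).1 := by
          intro m
          induction m with
          | zero =>
              intro b hb s0 hs0 hm hp
              rw [PySem.List.pyRange_one_eq_nil (a := b) (b := pvN land) (by omega),
                List.foldl_nil]
              exact hp
          | succ m ihm =>
              intro b hb s0 hs0 hm hp
              have hbN : b < pvN land := by omega
              rw [PySem.List.pyRange_one_cons hbN, List.foldl_cons]
              obtain ⟨hb1, hbsub, _⟩ := pvRowLoop land b hb hbN (pvM land).toNat 0
                (le_refl 0) (by omega) s0 hs0 _ rfl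
              exact ihm (b + 1) (by omega) _ hb1 (by omega) (hbsub hp)
        rw [heq]
        exact hmono n (a + 1) (by omega) _ h1 (by omega) hmarked
      · exact hcov2 p (by omega) hp2 hpone

-- membership in the inner neighbour-collection fold of pvGrow
theorem pvFoldAddIfMem (land : List (List Int)) (cells : PySem.Set (Int × Int)) :
    ∀ (l : List (Int × Int)) (g : PySem.Set (Int × Int)) (y : Int × Int),
      (y ∈ List.foldl (fun nxt q =>
        if 0 ≤ q.1 ∧ q.1 < pvN land ∧ 0 ≤ q.2 ∧ q.2 < pvM land ∧
            pvCell land q.1 q.2 = 1 ∧ q ∉ cells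
        then PySem.Set.add nxt q else nxt) g l ↔
      y ∈ g ∨ (y ∈ l ∧ POne land y ∧ y ∉ cells)) := by
  intro l
  induction l with
  | nil => intro g y; simp
  | cons q t ih =>
      intro g y
      rw [List.foldl_cons]
      by_cases hc : 0 ≤ q.1 ∧ q.1 < pvN land ∧ 0 ≤ q.2 ∧ q.2 < pvM land ∧
          pvCell land q.1 q.2 = 1 ∧ q ∉ cells
      · rw [if_pos hc, ih, PySem.Set.mem_add]
        constructor
        · rintro ((h | h) | ⟨h1, h2⟩)
          · exact Or.inl h
          · subst h
            exact Or.inr ⟨List.mem_cons_self,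
              ⟨hc.1, hc.2.1, hc.2.2.1, hc.2.2.2.1, hc.2.2.2.2.1⟩, hc.2.2.2.2.2⟩
          · exact Or.inr ⟨List.mem_cons_of_mem _ h1, h2⟩
        · rintro (h | ⟨hmem, hrest⟩)
          · exact Or.inl (Or.inl h)
          · rcases List.mem_cons.mp hmem with h | h
            · exact Or.inl (Or.inr h)
            · exact Or.inr ⟨h, hrest⟩
      · rw [if_neg hc, ih]
        constructor
        · rintro (h | ⟨h1, h2⟩)
          · exact Or.inl h
          · exact Or.inr ⟨List.mem_cons_of_mem _ h1, h2⟩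
        · rintro (h | ⟨hmem, hOne, hnc⟩)
          · exact Or.inl h
          · rcases List.mem_cons.mp hmem with h | h
            · exfalso
              subst h
              exact hc ⟨hOne.1, hOne.2.1, hOne.2.2.1, hOne.2.2.2.1, hOne.2.2.2.2, hnc⟩
            · exact Or.inr ⟨h, hOne, hnc⟩

theorem pvGrowMem (land : List (List Int)) (cells frontier : PySem.Set (Int × Int))
    (y : Int × Int) :
    y ∈ pvGrow land (pvN land) (pvM land) cells frontier ↔
      (∃ p ∈ frontier, y ∈ pvNbrs p.1 p.2) ∧ POne land y ∧ y ∉ cells := by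
  have haux : ∀ (fr : List (Int × Int)) (g : PySem.Set (Int × Int)),
      (y ∈ List.foldl (fun nxt p =>
        List.foldl (fun nxt q =>
          if 0 ≤ q.1 ∧ q.1 < pvN land ∧ 0 ≤ q.2 ∧ q.2 < pvM land ∧
              pvCell land q.1 q.2 = 1 ∧ q ∉ cells
          then PySem.Set.add nxt q else nxt) nxt (pvNbrs p.1 p.2)) g fr ↔
      y ∈ g ∨ ((∃ p ∈ fr, y ∈ pvNbrs p.1 p.2) ∧ POne land y ∧ y ∉ cells)) := by
    intro fr
    induction fr with
    | nil => intro g; simp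
    | cons p t ih =>
        intro g
        rw [List.foldl_cons, ih, pvFoldAddIfMem land cells]
        constructor
        · rintro ((h | h) | h)
          · exact Or.inl h
          · exact Or.inr ⟨⟨p, List.mem_cons_self, h.1⟩, h.2⟩
          · obtain ⟨⟨p', hp', hn⟩, h2⟩ := h
            exact Or.inr ⟨⟨p', List.mem_cons_of_mem _ hp', hn⟩, h2⟩
        · rintro (h | ⟨⟨p', hp', hn⟩, h2⟩)
          · exact Or.inl (Or.inl h)
          · rcases List.mem_cons.mp hp' with h | h
            · exact Or.inl (Or.inr ⟨by rw [← h]; exact hn, h2⟩)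
            · exact Or.inr ⟨⟨p', h, hn⟩, h2⟩
  rw [show pvGrow land (pvN land) (pvM land) cells frontier = List.foldl _ PySem.Set.empty
    frontier from rfl, haux frontier PySem.Set.empty]
  simp [PySem.Set.empty]

theorem pvSatLoop_nil (land : List (List Int)) (N M : Int) (fuel : Nat)
    (cells : PySem.Set (Int × Int)) : pvSatLoop land N M fuel cells [] = cells := by
  cases fuel <;> rfl

-- a closed, seeded, nodup cell list is exactly the column's reachable set
theorem pvSatClosed (land : List (List Int)) (c : Int) (cells : PySem.Set (Int × Int))
    (hR : ∀ p ∈ cells, p ∈ PRcol land c)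
    (hseed : ∀ s0 : Int × Int, POne land s0 → s0.2 = c → s0 ∈ cells)
    (hclosed : ∀ a ∈ cells, ∀ b, PAdj land a b → b ∈ cells) :
    ∀ p : Int × Int, p ∈ cells ↔ p ∈ PRcol land c := by
  intro p
  constructor
  · exact hR p
  · rintro ⟨s0, hOne, hcol, hreach⟩
    exact pvComp_subset_of_closed land s0 {q | q ∈ cells} hclosed (hseed s0 hOne hcol) hreach

theorem pvSatLoopLemma (land : List (List Int)) (c : Int) :
    ∀ (fuel : Nat) (cells frontier : PySem.Set (Int × Int)),
      cells.Nodup →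
      (∀ p ∈ frontier, p ∈ cells) →
      (∀ p ∈ cells, p ∈ PRcol land c) →
      (∀ s0 : Int × Int, POne land s0 → s0.2 = c → s0 ∈ cells) →
      (∀ a ∈ cells, a ∈ frontier ∨ ∀ b, PAdj land a b → b ∈ cells) →
      (PRcol land c \ {p | p ∈ cells}).ncard + 1 ≤ fuel →
      (pvSatLoop land (pvN land) (pvM land) fuel cells frontier).Nodup ∧
      (∀ p : Int × Int,
        p ∈ pvSatLoop land (pvN land) (pvM land) fuel cells frontier ↔ p ∈ PRcol land c) := by
  intro fuel
  induction fuel with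
  | zero => intro cells frontier _ _ _ _ _ hfuel; omega
  | succ fuel ih =>
      intro cells frontier hnd hfc hR hseed hclo hfuel
      match frontier with
      | [] =>
          rw [pvSatLoop_nil]
          have hclosed : ∀ a ∈ cells, ∀ b, PAdj land a b → b ∈ cells := by
            intro a ha b hab
            rcases hclo a ha with h | h
            · exact absurd h (List.not_mem_nil)
            · exact h b hab
          exact ⟨hnd, pvSatClosed land c cells hR hseed hclosed⟩
      | f :: fs =>
          have hstep : pvSatLoop land (pvN land) (pvM land) (fuel + 1) cells (f :: fs)
              = pvSatLoop land (pvN land) (pvM land) fuel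
                (PySem.Set.union cells (pvGrow land (pvN land) (pvM land) cells (f :: fs)))
                (pvGrow land (pvN land) (pvM land) cells (f :: fs)) := rfl
          rw [hstep]
          have hRfin : (PRcol land c).Finite :=
            pvFinite_of_subset_In land _ (pvRcol_In land c)
          have hnxtR : ∀ y ∈ pvGrow land (pvN land) (pvM land) cells (f :: fs),
              y ∈ PRcol land c := by
            intro y hy
            obtain ⟨⟨p, hp, hn⟩, hOne, _⟩ := (pvGrowMem land cells (f :: fs) y).mp hy
            exact pvRcol_closed land c p (hR p (hfc p hp)) y
              ⟨pvRcol_One land c p (hR p (hfc p hp)), hOne, hn⟩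
          have hnd' : (PySem.Set.union cells
              (pvGrow land (pvN land) (pvM land) cells (f :: fs))).Nodup :=
            PySem.Set.nodup_union _ _ hnd
          have hmemu : ∀ y : Int × Int, y ∈ PySem.Set.union cells
              (pvGrow land (pvN land) (pvM land) cells (f :: fs)) ↔
              y ∈ cells ∨ y ∈ pvGrow land (pvN land) (pvM land) cells (f :: fs) :=
            fun y => PySem.Set.mem_union _ _ y
          have hfc' : ∀ p ∈ pvGrow land (pvN land) (pvM land) cells (f :: fs),
              p ∈ PySem.Set.union cells (pvGrow land (pvN land) (pvM land) cells (f :: fs)) :=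
            fun p hp => (hmemu p).mpr (Or.inr hp)
          have hR' : ∀ p ∈ PySem.Set.union cells
              (pvGrow land (pvN land) (pvM land) cells (f :: fs)), p ∈ PRcol land c := by
            intro p hp
            rcases (hmemu p).mp hp with h | h
            · exact hR p h
            · exact hnxtR p h
          have hseed' : ∀ s0 : Int × Int, POne land s0 → s0.2 = c →
              s0 ∈ PySem.Set.union cells (pvGrow land (pvN land) (pvM land) cells (f :: fs)) :=
            fun s0 h1 h2 => (hmemu s0).mpr (Or.inl (hseed s0 h1 h2))
          have hclo' : ∀ a ∈ PySem.Set.union cells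
              (pvGrow land (pvN land) (pvM land) cells (f :: fs)),
              a ∈ pvGrow land (pvN land) (pvM land) cells (f :: fs) ∨
              ∀ b, PAdj land a b → b ∈ PySem.Set.union cells
                (pvGrow land (pvN land) (pvM land) cells (f :: fs)) := by
            intro a ha
            by_cases hanxt : a ∈ pvGrow land (pvN land) (pvM land) cells (f :: fs)
            · exact Or.inl hanxt
            · have hacells : a ∈ cells := by
                rcases (hmemu a).mp ha with h | h
                · exact h
                · exact absurd h hanxt
              right
              intro b hab
              by_cases hbc : b ∈ cells
              · exact (hmemu b).mpr (Or.inl hbc)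
              · rcases hclo a hacells with h | h
                · refine (hmemu b).mpr (Or.inr ?_)
                  exact (pvGrowMem land cells (f :: fs) b).mpr ⟨⟨a, h, hab.2.2⟩, hab.2.1, hbc⟩
                · exact (hmemu b).mpr (Or.inl (h b hab))
          by_cases hgne : pvGrow land (pvN land) (pvM land) cells (f :: fs) = []
          · rw [hgne, pvSatLoop_nil]
            have hclosed : ∀ a ∈ PySem.Set.union cells ([] : PySem.Set (Int × Int)),
                ∀ b, PAdj land a b → b ∈ PySem.Set.union cells ([] : PySem.Set (Int × Int)) := by
              intro a ha b hab
              have hacells : a ∈ cells := by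
                rcases (PySem.Set.mem_union cells [] a).mp ha with h | h
                · exact h
                · exact absurd h List.not_mem_nil
              refine (PySem.Set.mem_union cells [] b).mpr (Or.inl ?_)
              by_cases hbc : b ∈ cells
              · exact hbc
              · rcases hclo a hacells with h | h
                · exfalso
                  have hbg : b ∈ pvGrow land (pvN land) (pvM land) cells (f :: fs) :=
                    (pvGrowMem land cells (f :: fs) b).mpr ⟨⟨a, h, hab.2.2⟩, hab.2.1, hbc⟩
                  rw [hgne] at hbg
                  exact absurd hbg List.not_mem_nil
                · exact h b hab
            refine ⟨PySem.Set.nodup_union _ _ hnd, ?_⟩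
            refine pvSatClosed land c _ ?_ ?_ hclosed
            · intro p hp
              rcases (PySem.Set.mem_union cells [] p).mp hp with h | h
              · exact hR p h
              · exact absurd h List.not_mem_nil
            · intro s0 h1 h2
              exact (PySem.Set.mem_union cells [] s0).mpr (Or.inl (hseed s0 h1 h2))
          · obtain ⟨y0, hy0mem⟩ := List.exists_mem_of_ne_nil _ hgne
            have hy0 := (pvGrowMem land cells (f :: fs) y0).mp hy0mem
            have hy0R : y0 ∈ PRcol land c := hnxtR y0 hy0mem
            have hy0d : y0 ∈ PRcol land c \ {p | p ∈ cells} := ⟨hy0R, hy0.2.2⟩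
            have hfuel' : (PRcol land c \
                {p | p ∈ PySem.Set.union cells
                  (pvGrow land (pvN land) (pvM land) cells (f :: fs))}).ncard + 1 ≤ fuel := by
              have hsub : PRcol land c \
                  {p | p ∈ PySem.Set.union cells
                    (pvGrow land (pvN land) (pvM land) cells (f :: fs))} ⊆
                  (PRcol land c \ {p | p ∈ cells}) \ {y0} := by
                intro t ht
                refine ⟨⟨ht.1, fun hc2 => ht.2 ((hmemu t).mpr (Or.inl hc2))⟩, ?_⟩
                intro hty
                rw [Set.mem_singleton_iff] at hty
                exact ht.2 ((hmemu t).mpr (Or.inr (by rw [hty]; exact hy0mem)))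
              have h1 : (PRcol land c \
                  {p | p ∈ PySem.Set.union cells
                    (pvGrow land (pvN land) (pvM land) cells (f :: fs))}).ncard ≤
                  ((PRcol land c \ {p | p ∈ cells}) \ {y0}).ncard :=
                Set.ncard_le_ncard hsub ((hRfin.subset Set.diff_subset).subset
                  Set.diff_subset)
              have h2 : ((PRcol land c \ {p | p ∈ cells}) \ {y0}).ncard =
                  (PRcol land c \ {p | p ∈ cells}).ncard - 1 :=
                Set.ncard_diff_singleton_of_mem hy0d
              have h3 : 0 < (PRcol land c \ {p | p ∈ cells}).ncard :=
                (Set.ncard_pos (hRfin.subset Set.diff_subset)).mpr ⟨y0, hy0d⟩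
              omega
            exact ih _ _ hnd' hfc' hR' hseed' hclo' hfuel'

theorem pvGetDRep (n : ℕ) (c : Int) :
    PySem.List.pyGetD (List.replicate n (0 : Int)) c 0 = 0 := by
  rcases pvPyGetD_mem_or (List.replicate n (0 : Int)) c 0 with h | h
  · exact List.eq_of_mem_replicate h
  · exact h

theorem pvSeedsMem (land : List (List Int)) (c : Int) (hc : 0 ≤ c) (hc2 : c < pvM land)
    (p : Int × Int) :
    p ∈ PySem.Set.ofList (((PySem.List.pyRange 0 (pvN land) 1).filter
      (fun i => pvCell land i c == 1)).map (fun i => (i, c))) ↔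
    POne land p ∧ p.2 = c := by
  obtain ⟨a, b⟩ := p
  rw [PySem.Set.mem_ofList]
  simp only [List.mem_map, List.mem_filter, PySem.List.mem_pyRange_one, beq_iff_eq,
    Prod.mk.injEq]
  constructor
  · rintro ⟨i, ⟨⟨h1, h2⟩, h3⟩, h4, h5⟩
    subst h4; subst h5
    exact ⟨⟨h1, h2, hc, hc2, h3⟩, rfl⟩
  · rintro ⟨⟨h1, h2, _, _, h5⟩, h6⟩
    exact ⟨a, ⟨⟨h1, h2⟩, by rw [show c = b from h6.symm]; exact h5⟩, rfl, h6.symm⟩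

theorem pvColumnValue (land : List (List Int)) (c : Int) (hc : 0 ≤ c) (hc2 : c < pvM land) :
    ((pvSatLoop land (pvN land) (pvM land) ((pvN land).toNat * (pvM land).toNat + 1)
      (PySem.Set.ofList (((PySem.List.pyRange 0 (pvN land) 1).filter
        (fun i => pvCell land i c == 1)).map (fun i => (i, c))))
      (PySem.Set.ofList (((PySem.List.pyRange 0 (pvN land) 1).filter
        (fun i => pvCell land i c == 1)).map (fun i => (i, c))))).length : Int)
      = ((PRcol land c).ncard : Int) := by
  have hseedmem := pvSeedsMem land c hc hc2
  have hRfin : (PRcol land c).Finite := pvFinite_of_subset_In land _ (pvRcol_In land c)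
  have hfuel : (PRcol land c \ {p | p ∈ PySem.Set.ofList
      (((PySem.List.pyRange 0 (pvN land) 1).filter
        (fun i => pvCell land i c == 1)).map (fun i => (i, c)))}).ncard + 1
      ≤ (pvN land).toNat * (pvM land).toNat + 1 := by
    have h1 : (PRcol land c \ {p | p ∈ PySem.Set.ofList
        (((PySem.List.pyRange 0 (pvN land) 1).filter
          (fun i => pvCell land i c == 1)).map (fun i => (i, c)))}).ncard
        ≤ (PRcol land c).ncard := Set.ncard_le_ncard Set.diff_subset hRfin
    have h2 := pvNcard_le_box land _ (pvRcol_In land c)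
    omega
  obtain ⟨hndr, hmemr⟩ := pvSatLoopLemma land c
    ((pvN land).toNat * (pvM land).toNat + 1) _ _
    (PySem.Set.nodup_ofList _) (fun p hp => hp)
    (fun p hp => ⟨p, ((hseedmem p).mp hp).1, ((hseedmem p).mp hp).2,
      Relation.ReflTransGen.refl⟩)
    (fun s0 h1 h2 => (hseedmem s0).mpr ⟨h1, h2⟩)
    (fun a ha => Or.inl ha) hfuel
  have hset : PRcol land c = {p | p ∈ pvSatLoop land (pvN land) (pvM land)
      ((pvN land).toNat * (pvM land).toNat + 1)
      (PySem.Set.ofList (((PySem.List.pyRange 0 (pvN land) 1).filter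
        (fun i => pvCell land i c == 1)).map (fun i => (i, c))))
      (PySem.Set.ofList (((PySem.List.pyRange 0 (pvN land) 1).filter
        (fun i => pvCell land i c == 1)).map (fun i => (i, c))))} := by
    ext p; exact (hmemr p).symm
  rw [hset, ← List.coe_toFinset, Set.ncard_coe_finset, List.toFinset_card_of_nodup hndr]

theorem pvMaxFold (M : Int) (hM : 0 < M) (g : Int → Int) (hnn : 0 ≤ g 0) (oil : List Int)
    (hlen : oil.length = M.toNat)
    (hval : ∀ c : Int, 0 ≤ c → c < M → PySem.List.pyGetD oil c 0 = g c) :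
    (PySem.List.max? oil (fun x => x)).getD 0
      = List.foldl (fun best c => if g c > best then g c else best) 0
          (PySem.List.pyRange 0 M 1) := by
  have hlenI : (oil.length : Int) = M := by rw [hlen]; omega
  have hoil : oil = (PySem.List.pyRange 0 M 1).map (fun j => PySem.List.pyGetD oil j 0) := by
    have h := PySem.List.map_pyGetD_pyRange_zero oil 0
    rw [show PySem.List.len oil = M from by simp [hlenI]] at h
    exact h.symm
  have hmap2 : (PySem.List.pyRange 0 M 1).map (fun j => PySem.List.pyGetD oil j 0)
      = (PySem.List.pyRange 0 M 1).map g :=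
    List.map_congr_left (fun x hx => hval x (PySem.List.mem_pyRange_one.mp hx).1
      (PySem.List.mem_pyRange_one.mp hx).2)
  have hcons : PySem.List.pyRange 0 M 1 = 0 :: PySem.List.pyRange 1 M 1 := by
    have h := PySem.List.pyRange_one_cons (a := 0) (b := M) hM
    norm_num at h
    exact h
  have hfold : ∀ (l : List Int) (b : Int),
      List.foldl (fun best c => if g c > best then g c else best) b l
        = List.foldl max b (l.map g) := by
    intro l
    induction l with
    | nil => intro b; simp
    | cons x t ih =>
        intro b
        rw [List.foldl_cons, List.map_cons, List.foldl_cons, ih]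
        have : (if g x > b then g x else b) = max b (g x) := by
          by_cases h : g x > b
          · rw [if_pos h, max_eq_right (le_of_lt h)]
          · rw [if_neg h, max_eq_left (by omega)]
        rw [this]
  conv_lhs => rw [hoil, hmap2, hcons, List.map_cons]
  rw [PySem.List.max?_id_cons, Option.getD_some, hcons, List.foldl_cons]
  have h0 : (if g 0 > 0 then g 0 else (0 : Int)) = g 0 := by
    by_cases h : g 0 > 0
    · rw [if_pos h]
    · rw [if_neg h]; omega
  rw [h0, hfold]

theorem pvSolutionEq (land : List (List Int)) (hpre : Pre_solution land) :
    solution land = solution_alt land := by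
  have hM : 0 < pvM land := by
    have := hpre.2.1
    simp only [pvM]
    omega
  -- A: run the outer double loop
  have hA : solution land = (PySem.List.max? (List.foldl
      (fun st i => List.foldl (fun st j =>
        if pvCell land i j = 1 ∧ pvVget st.1 i j = false
        then pvGridBfs land (pvN land) (pvM land) st.1 st.2 i j else st) st
        (PySem.List.pyRange 0 (pvM land) 1))
      (List.replicate (pvN land).toNat (List.replicate (pvM land).toNat false),
        List.replicate (pvM land).toNat (0 : Int))
      (PySem.List.pyRange 0 (pvN land) 1)).2 (fun x => x)).getD 0 := rfl
  have hinit : POuter land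
      (List.replicate (pvN land).toNat (List.replicate (pvM land).toNat false),
        List.replicate (pvM land).toNat (0 : Int)) := by
    refine ⟨pvShape_replicate land, ?_, by simp, ?_⟩
    · intro a ha b hab
      exact absurd (pvVget_replicate _ _ a.1 a.2 ▸ ha.2) Bool.false_ne_true
    · intro c hc hc2
      have hm : PMarked land
          (List.replicate (pvN land).toNat (List.replicate (pvM land).toNat false)) = ∅ := by
        ext p
        simp [PMarked, pvVget_replicate]
      rw [pvGetDRep, hm, Set.empty_inter, Set.ncard_empty]
      simp
  obtain ⟨hout, hcov⟩ := pvColLoop land (pvN land).toNat 0 (le_refl 0) (by omega)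
    _ hinit _ rfl
  have hvals : ∀ c : Int, 0 ≤ c → c < pvM land →
      PySem.List.pyGetD (List.foldl
        (fun st i => List.foldl (fun st j =>
          if pvCell land i j = 1 ∧ pvVget st.1 i j = false
          then pvGridBfs land (pvN land) (pvM land) st.1 st.2 i j else st) st
          (PySem.List.pyRange 0 (pvM land) 1))
        (List.replicate (pvN land).toNat (List.replicate (pvM land).toNat false),
          List.replicate (pvM land).toNat (0 : Int))
        (PySem.List.pyRange 0 (pvN land) 1)).2 c 0 = ((PRcol land c).ncard : Int) := by
    intro c hc hc2
    have hsub : PRcol land c ⊆ PMarked land (List.foldl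
        (fun st i => List.foldl (fun st j =>
          if pvCell land i j = 1 ∧ pvVget st.1 i j = false
          then pvGridBfs land (pvN land) (pvM land) st.1 st.2 i j else st) st
          (PySem.List.pyRange 0 (pvM land) 1))
        (List.replicate (pvN land).toNat (List.replicate (pvM land).toNat false),
          List.replicate (pvM land).toNat (0 : Int))
        (PySem.List.pyRange 0 (pvN land) 1)).1 := by
      intro t ht
      have hone := pvRcol_One land c t ht
      exact hcov t hone.1 hone.2.1 hone
    rw [hout.2.2.2 c hc hc2, Set.inter_eq_right.mpr hsub]
  -- B: the per-column fold computes the same numbers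
  have hB : solution_alt land = List.foldl
      (fun best c =>
        if (((pvSatLoop land (pvN land) (pvM land)
            ((pvN land).toNat * (pvM land).toNat + 1)
            (PySem.Set.ofList (((PySem.List.pyRange 0 (pvN land) 1).filter
              (fun i => pvCell land i c == 1)).map (fun i => (i, c))))
            (PySem.Set.ofList (((PySem.List.pyRange 0 (pvN land) 1).filter
              (fun i => pvCell land i c == 1)).map (fun i => (i, c))))).length : Int)) > best
        then ((pvSatLoop land (pvN land) (pvM land)
            ((pvN land).toNat * (pvM land).toNat + 1)
            (PySem.Set.ofList (((PySem.List.pyRange 0 (pvN land) 1).filter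
              (fun i => pvCell land i c == 1)).map (fun i => (i, c))))
            (PySem.Set.ofList (((PySem.List.pyRange 0 (pvN land) 1).filter
              (fun i => pvCell land i c == 1)).map (fun i => (i, c))))).length : Int)
        else best) 0 (PySem.List.pyRange 0 (pvM land) 1) := rfl
  have hBcongr : List.foldl
      (fun best c =>
        if (((pvSatLoop land (pvN land) (pvM land)
            ((pvN land).toNat * (pvM land).toNat + 1)
            (PySem.Set.ofList (((PySem.List.pyRange 0 (pvN land) 1).filter
              (fun i => pvCell land i c == 1)).map (fun i => (i, c))))
            (PySem.Set.ofList (((PySem.List.pyRange 0 (pvN land) 1).filter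
              (fun i => pvCell land i c == 1)).map (fun i => (i, c))))).length : Int)) > best
        then ((pvSatLoop land (pvN land) (pvM land)
            ((pvN land).toNat * (pvM land).toNat + 1)
            (PySem.Set.ofList (((PySem.List.pyRange 0 (pvN land) 1).filter
              (fun i => pvCell land i c == 1)).map (fun i => (i, c))))
            (PySem.Set.ofList (((PySem.List.pyRange 0 (pvN land) 1).filter
              (fun i => pvCell land i c == 1)).map (fun i => (i, c))))).length : Int)
        else best) 0 (PySem.List.pyRange 0 (pvM land) 1)
      = List.foldl (fun best c => if ((PRcol land c).ncard : Int) > best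
          then ((PRcol land c).ncard : Int) else best) 0
          (PySem.List.pyRange 0 (pvM land) 1) := by
    apply PySem.List.foldl_congr_mem
    intro acc x hx
    have hx1 := (PySem.List.mem_pyRange_one.mp hx).1
    have hx2 := (PySem.List.mem_pyRange_one.mp hx).2
    rw [pvColumnValue land x hx1 hx2]
  rw [hA, hB, hBcongr,
    pvMaxFold (pvM land) hM (fun c => ((PRcol land c).ncard : Int))
      (Int.natCast_nonneg _) _ hout.2.2.1 hvals]

-- ===== VERDICT (by name: the statement is the Claim_ definition above) =====
theorem solution_spec : Claim_equal_solution := by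
  intro land _ hpre
  exact pvSolutionEq land hpre
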